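-- pv_equiv track=rewrite | github.com/fhdufhdu/CodingTest | 프로그래머스/2/87390. n＾2 배열 자르기/n＾2 배열 자르기.py | solution
-- ===== SOURCE A (Python) =====
-- def solution(n, left, right):
--     answer = []
--
--     for lr in range(left, right+1):
--         i = lr // n
--         j = lr - (i*n)
--
--         if i >= j:
--             answer.append(i+1)
--         else:
--             answer.append(j+1)
--     return answer
-- ===== SOURCE B (Python) =====
-- def solution(n, left, right):
--     r0, c0 = divmod(left, n)
--     r1, c1 = divmod(right, n)
--     answer = []
--     for r in range(r0, r1 + 1):
--         lo = c0 if r == r0 else 0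
--         hi = c1 if r == r1 else n - 1
--         # columns lo..min(r, hi) hold the value r+1
--         answer += [r + 1] * (min(r, hi) - lo + 1)
--         # columns j > r hold j+1
--         answer += list(range(max(r + 1, lo) + 1, hi + 2))
--     return answer
-- ===== Notes on version B (the rewrite author's own statement) =====
-- stated objective: alternative
-- what changed: B replaces A's per-flat-index loop (a divmod and a comparison for every index) by a per-row decomposition: it computes the first and last row once with divmod and emits each covered row as a constant run [r+1]*cnt followed by an arithmetic range, concatenated in order.
-- outside the precondition, e.g. on solution(-3, 0, 2): A returns [1, 0, 0], B returns []; on solution(0, 1, 0): A returns [], B raises ZeroDivisionError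
import Mathlib
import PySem

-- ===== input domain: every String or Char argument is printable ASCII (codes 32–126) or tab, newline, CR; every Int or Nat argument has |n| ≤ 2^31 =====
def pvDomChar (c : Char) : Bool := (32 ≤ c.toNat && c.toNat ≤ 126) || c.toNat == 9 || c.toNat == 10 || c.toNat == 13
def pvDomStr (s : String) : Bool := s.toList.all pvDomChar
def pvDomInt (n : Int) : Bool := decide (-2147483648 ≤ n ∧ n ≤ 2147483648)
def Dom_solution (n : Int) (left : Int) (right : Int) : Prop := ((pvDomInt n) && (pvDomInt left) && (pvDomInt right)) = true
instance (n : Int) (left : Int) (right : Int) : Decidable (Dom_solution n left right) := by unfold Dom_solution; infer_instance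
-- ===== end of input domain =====

-- B rewrites A's per-flat-index divmod loop as a per-row decomposition (constant run + arithmetic
-- range per covered row); same O(right-left) cost, different traversal (objective: alternative).


-- ===== PORT A =====
def solution (n : Int) (left : Int) (right : Int) : List Int :=
  (PySem.List.pyRange left (right + 1) 1).foldl
    (fun answer lr =>
      let i := PySem.Int.floordiv lr n
      let j := lr - (i * n)
      if j ≤ i then answer ++ [i + 1] else answer ++ [j + 1])
    []

-- ===== PORT B =====
def solution_alt (n : Int) (left : Int) (right : Int) : List Int :=
  let r0 := PySem.Int.floordiv left n
  let c0 := PySem.Int.mod left n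
  let r1 := PySem.Int.floordiv right n
  let c1 := PySem.Int.mod right n
  (PySem.List.pyRange r0 (r1 + 1) 1).foldl
    (fun answer r =>
      let lo := if r = r0 then c0 else 0
      let hi := if r = r1 then c1 else n - 1
      answer ++ List.replicate (min r hi - lo + 1).toNat (r + 1)
             ++ PySem.List.pyRange (max (r + 1) lo + 1) (hi + 2) 1)
    []

-- ===== PRECONDITION & SPEC =====
-- Pre_ restricts to the problem's natural domain (n is the side of an n×n grid): for n = 0 with a
-- nonempty index range A raises ZeroDivisionError, and for n ≤ 0 otherwise A's value is a
-- floor-division artefact outside the natural domain which B does not reproduce.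
def Pre_solution (n : Int) (left : Int) (right : Int) : Prop := 1 ≤ n
instance (n : Int) (left : Int) (right : Int) : Decidable (Pre_solution n left right) := by unfold Pre_solution; infer_instance
def pvWitness_solution : Int × Int × Int := (3, 2, 5)

def Spec_solution (n : Int) (left : Int) (right : Int) (out : List Int) : Prop := out = solution_alt n left right
instance (n : Int) (left : Int) (right : Int) (out : List Int) : Decidable (Spec_solution n left right out) := by unfold Spec_solution; infer_instance

-- ===== CLAIM (what is proved, stated in full; the proofs are below) =====
def Claim_equal_solution : Prop := ∀ (n : Int) (left : Int) (right : Int), Dom_solution n left right → Pre_solution n left right → Spec_solution n left right (solution n left right)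

-- ===== LEMMAS AND PROOFS =====

-- the value A appends at flat index lr
def pvG (n lr : Int) : Int := max (PySem.Int.floordiv lr n) (lr - PySem.Int.floordiv lr n * n) + 1

-- the per-row segment B appends for row r (lo/hi the covered column bounds)
def pvSeg (r lo hi : Int) : List Int :=
  List.replicate (min r hi - lo + 1).toNat (r + 1) ++ PySem.List.pyRange (max (r + 1) lo + 1) (hi + 2) 1

lemma solution_eq_map (n left right : Int) :
    solution n left right = (PySem.List.pyRange left (right + 1) 1).map (pvG n) := by
  unfold solution
  refine Eq.trans (PySem.List.foldl_congr_mem _ _ (fun answer lr => answer ++ [pvG n lr]) [] ?_) ?_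
  · intro acc lr _
    show (if lr - PySem.Int.floordiv lr n * n ≤ PySem.Int.floordiv lr n
            then acc ++ [PySem.Int.floordiv lr n + 1]
            else acc ++ [lr - PySem.Int.floordiv lr n * n + 1]) = acc ++ [pvG n lr]
    simp only [pvG]
    split_ifs with h
    · rw [max_eq_left h]
    · rw [max_eq_right (by omega)]
  · rw [PySem.List.foldl_append_singleton_eq_map, List.nil_append]

lemma solution_alt_eq_flatMap (n left right : Int) :
    solution_alt n left right =
      (PySem.List.pyRange (PySem.Int.floordiv left n) (PySem.Int.floordiv right n + 1) 1).flatMap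
        (fun r => pvSeg r (if r = PySem.Int.floordiv left n then PySem.Int.mod left n else 0)
                          (if r = PySem.Int.floordiv right n then PySem.Int.mod right n else n - 1)) := by
  unfold solution_alt
  refine Eq.trans (PySem.List.foldl_congr_mem _ _
      (fun answer r => answer ++
        pvSeg r (if r = PySem.Int.floordiv left n then PySem.Int.mod left n else 0)
                (if r = PySem.Int.floordiv right n then PySem.Int.mod right n else n - 1)) [] ?_) ?_
  · intro acc r _
    show acc ++ List.replicate
          (min r (if r = PySem.Int.floordiv right n then PySem.Int.mod right n else n - 1)
             - (if r = PySem.Int.floordiv left n then PySem.Int.mod left n else 0) + 1).toNat (r + 1)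
        ++ PySem.List.pyRange
            (max (r + 1) (if r = PySem.Int.floordiv left n then PySem.Int.mod left n else 0) + 1)
            ((if r = PySem.Int.floordiv right n then PySem.Int.mod right n else n - 1) + 2) 1
      = acc ++ pvSeg r (if r = PySem.Int.floordiv left n then PySem.Int.mod left n else 0)
                       (if r = PySem.Int.floordiv right n then PySem.Int.mod right n else n - 1)
    simp only [pvSeg, List.append_assoc]
  · rw [PySem.List.foldl_append_eq_flatMap, List.nil_append]

-- shape of one row: the constant run plus the arithmetic range is the column-wise map
lemma pvSeg_eq_map (r lo hi : Int) :
    pvSeg r lo hi = (PySem.List.pyRange lo (hi + 1) 1).map (fun j => max r j + 1) := by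
  have key : ∀ (k : Nat) (lo : Int), (hi + 1 - lo).toNat ≤ k →
      pvSeg r lo hi = (PySem.List.pyRange lo (hi + 1) 1).map (fun j => max r j + 1) := by
    intro k
    induction k with
    | zero =>
        intro lo hk
        have hle : hi + 1 ≤ lo := by omega
        rw [PySem.List.pyRange_one_eq_nil hle, List.map_nil]
        unfold pvSeg
        have h1 : (min r hi - lo + 1).toNat = 0 := by omega
        have h2 : hi + 2 ≤ max (r + 1) lo + 1 := by omega
        rw [h1, PySem.List.pyRange_one_eq_nil h2, List.replicate_zero, List.nil_append]
    | succ k ih =>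
        intro lo hk
        by_cases hlo : hi + 1 ≤ lo
        · rw [PySem.List.pyRange_one_eq_nil hlo, List.map_nil]
          unfold pvSeg
          have h1 : (min r hi - lo + 1).toNat = 0 := by omega
          have h2 : hi + 2 ≤ max (r + 1) lo + 1 := by omega
          rw [h1, PySem.List.pyRange_one_eq_nil h2, List.replicate_zero, List.nil_append]
        · have hlt : lo < hi + 1 := by omega
          rw [PySem.List.pyRange_one_cons hlt, List.map_cons]
          have ihlo := ih (lo + 1) (by omega)
          by_cases hr : lo ≤ r
          · have hhead : max r lo + 1 = r + 1 := by omega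
            have hcnt : (min r hi - lo + 1).toNat = (min r hi - (lo + 1) + 1).toNat + 1 := by omega
            have hmax : max (r + 1) lo = max (r + 1) (lo + 1) := by omega
            unfold pvSeg at ihlo ⊢
            rw [hcnt, List.replicate_succ, List.cons_append, hmax, ihlo, hhead]
          · have hhead : max r lo + 1 = lo + 1 := by omega
            have hcnt : (min r hi - lo + 1).toNat = 0 := by omega
            have hcnt' : (min r hi - (lo + 1) + 1).toNat = 0 := by omega
            have hmax : max (r + 1) lo = lo := by omega
            have hmax' : max (r + 1) (lo + 1) = lo + 1 := by omega
            unfold pvSeg at ihlo ⊢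
            rw [hcnt, hmax, List.replicate_zero, List.nil_append,
                PySem.List.pyRange_one_cons (by omega : lo + 1 < hi + 2), hhead]
            rw [hcnt', hmax', List.replicate_zero, List.nil_append] at ihlo
            rw [ihlo]
  exact key (hi + 1 - lo).toNat lo le_rfl

lemma pvG_row (n : Int) (hn : 1 ≤ n) (r j : Int) (h0 : 0 ≤ j) (h1 : j < n) :
    pvG n (r * n + j) = max r j + 1 := by
  have hfd : PySem.Int.floordiv (r * n + j) n = r := by
    rw [PySem.Int.floordiv_eq_iff_of_pos (by omega)]
    constructor <;> nlinarith
  unfold pvG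
  rw [hfd]
  ring_nf

-- a shifted range maps to the base range
lemma pyRange_shift_map {β : Type} (s a b : Int) (f : Int → β) :
    (PySem.List.pyRange (s + a) (s + b) 1).map f = (PySem.List.pyRange a b 1).map (fun j => f (s + j)) := by
  rw [PySem.List.pyRange_one, PySem.List.pyRange_one, List.map_map, List.map_map]
  have h : (s + b - (s + a)).toNat = (b - a).toNat := by omega
  rw [h]
  apply List.map_congr_left
  intro x _
  simp only [Function.comp_apply]
  ring_nf

-- one full row-segment of B equals A's map over the corresponding flat indices
lemma pvSeg_eq_flat (n : Int) (hn : 1 ≤ n) (r lo hi : Int) (hlo : 0 ≤ lo) (hhi : hi < n) :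
    pvSeg r lo hi = (PySem.List.pyRange (r * n + lo) (r * n + (hi + 1)) 1).map (pvG n) := by
  rw [pvSeg_eq_map, pyRange_shift_map]
  apply List.map_congr_left
  intro j hj
  rw [PySem.List.mem_pyRange_one] at hj
  rw [pvG_row n hn r j (by omega) (by omega)]

-- floor-division bracket, in omega-friendly (expanded) form
lemma floordiv_bracket (n l : Int) (hn : 1 ≤ n) :
    PySem.Int.floordiv l n * n ≤ l ∧ l < PySem.Int.floordiv l n * n + n := by
  have h := (PySem.Int.floordiv_eq_iff_of_pos (a := l) (b := n)
      (q := PySem.Int.floordiv l n) (by omega)).mp rfl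
  exact ⟨h.1, by nlinarith [h.2]⟩

lemma mod_eq_sub (n l : Int) : PySem.Int.mod l n = l - PySem.Int.floordiv l n * n := by
  have h := PySem.Int.floordiv_mul_add_mod l n
  omega

-- A's map over the flat indices of a single row equals B's segment for it
lemma single_row (n : Int) (hn : 1 ≤ n) (l r : Int)
    (heq : PySem.Int.floordiv l n = PySem.Int.floordiv r n) :
    pvSeg (PySem.Int.floordiv r n) (PySem.Int.mod l n) (PySem.Int.mod r n)
      = (PySem.List.pyRange l (r + 1) 1).map (pvG n) := by
  have bl := floordiv_bracket n l hn
  have br := floordiv_bracket n r hn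
  have hml := mod_eq_sub n l
  have hmr := mod_eq_sub n r
  rw [heq] at bl hml
  rw [pvSeg_eq_flat n hn _ _ _ (by omega) (by omega)]
  have e1 : PySem.Int.floordiv r n * n + PySem.Int.mod l n = l := by omega
  have e2 : PySem.Int.floordiv r n * n + (PySem.Int.mod r n + 1) = r + 1 := by omega
  rw [e1, e2]

-- at most one row (floordiv r n ≤ floordiv l n): the whole claim directly
lemma rows_le (n : Int) (hn : 1 ≤ n) (l r : Int)
    (h10 : PySem.Int.floordiv r n ≤ PySem.Int.floordiv l n) :
    (PySem.List.pyRange (PySem.Int.floordiv l n) (PySem.Int.floordiv r n + 1) 1).flatMap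
        (fun row => pvSeg row (if row = PySem.Int.floordiv l n then PySem.Int.mod l n else 0)
                              (if row = PySem.Int.floordiv r n then PySem.Int.mod r n else n - 1))
      = (PySem.List.pyRange l (r + 1) 1).map (pvG n) := by
  have bl := floordiv_bracket n l hn
  have br := floordiv_bracket n r hn
  rcases lt_or_eq_of_le h10 with hlt | heq
  · -- no rows at all: both sides are empty
    have hmul : PySem.Int.floordiv r n * n + n ≤ PySem.Int.floordiv l n * n := by nlinarith
    rw [PySem.List.pyRange_one_eq_nil (by omega), PySem.List.pyRange_one_eq_nil (by omega),
        List.flatMap_nil, List.map_nil]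
  · -- exactly one row
    rw [← heq]
    rw [PySem.List.pyRange_one_cons (by omega), PySem.List.pyRange_one_eq_nil (le_refl _)]
    simp only [List.flatMap_cons, List.flatMap_nil, List.append_nil, if_true]
    exact single_row n hn l r heq.symm

-- main induction over the rows
lemma rows_eq (n : Int) (hn : 1 ≤ n) :
    ∀ (k : Nat) (l r : Int),
      (PySem.Int.floordiv r n - PySem.Int.floordiv l n).toNat ≤ k →
      (PySem.List.pyRange (PySem.Int.floordiv l n) (PySem.Int.floordiv r n + 1) 1).flatMap
          (fun row => pvSeg row (if row = PySem.Int.floordiv l n then PySem.Int.mod l n else 0)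
                                (if row = PySem.Int.floordiv r n then PySem.Int.mod r n else n - 1))
        = (PySem.List.pyRange l (r + 1) 1).map (pvG n) := by
  intro k
  induction k with
  | zero =>
      intro l r hk
      exact rows_le n hn l r (by omega)
  | succ k ih =>
      intro l r hk
      by_cases h10 : PySem.Int.floordiv r n ≤ PySem.Int.floordiv l n
      · exact rows_le n hn l r h10
      · -- more than one row: peel off the first row and recurse from l' = (floordiv l n + 1) * n
        have h01 : PySem.Int.floordiv l n < PySem.Int.floordiv r n := by omega
        have bl := floordiv_bracket n l hn
        have br := floordiv_bracket n r hn
        have hml := mod_eq_sub n l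
        have hfd' : PySem.Int.floordiv ((PySem.Int.floordiv l n + 1) * n) n
            = PySem.Int.floordiv l n + 1 := by
          rw [PySem.Int.floordiv_eq_iff_of_pos (by omega)]
          exact ⟨le_refl _, by nlinarith⟩
        have hmod' : PySem.Int.mod ((PySem.Int.floordiv l n + 1) * n) n = 0 := by
          rw [mod_eq_sub, hfd']
          ring
        have ihspec := ih ((PySem.Int.floordiv l n + 1) * n) r (by rw [hfd']; omega)
        rw [hfd', hmod'] at ihspec
        simp only [ite_self] at ihspec
        have hexp : (PySem.Int.floordiv l n + 1) * n = PySem.Int.floordiv l n * n + n := by ring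
        have hmul : PySem.Int.floordiv l n * n + n ≤ PySem.Int.floordiv r n * n := by nlinarith
        rw [PySem.List.pyRange_one_append l ((PySem.Int.floordiv l n + 1) * n) (r + 1)
              (by omega) (by omega),
            List.map_append,
            PySem.List.pyRange_one_cons (by omega :
              PySem.Int.floordiv l n < PySem.Int.floordiv r n + 1)]
        simp only [List.flatMap_cons, if_true]
        rw [if_neg (by omega : ¬ PySem.Int.floordiv l n = PySem.Int.floordiv r n)]
        congr 1
        · -- the first (possibly partial) row covers flat indices l .. (floordiv l n + 1)*n - 1
          rw [pvSeg_eq_flat n hn _ _ _ (by omega) (by omega)]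
          have e1 : PySem.Int.floordiv l n * n + PySem.Int.mod l n = l := by omega
          have e2 : PySem.Int.floordiv l n * n + (n - 1 + 1)
              = (PySem.Int.floordiv l n + 1) * n := by ring
          rw [e1, e2]
        · -- the remaining rows: the two per-row functions agree there, then the IH applies
          rw [← ihspec]
          apply List.flatMap_congr
          intro row hrow
          rw [PySem.List.mem_pyRange_one] at hrow
          rw [if_neg (by omega : ¬ row = PySem.Int.floordiv l n)]

-- ===== VERDICT (by name: the statement is the Claim_ definition above) =====
theorem solution_spec : Claim_equal_solution := by
  intro n left right _hdom hpre
  unfold Spec_solution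
  rw [solution_eq_map, solution_alt_eq_flatMap,
      rows_eq n hpre (PySem.Int.floordiv right n - PySem.Int.floordiv left n).toNat left right le_rfl]
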